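-- pv_equiv track=rewrite | github.com/queuetue/plantangenet | python/plantangenet/mixins/luck.py | runs
-- ===== SOURCE A (Python) =====
-- def runs(symbols: str, length: int) -> int:
--     """Count the number of runs of identical characters in a symbols."""
--     count = 0
--     current_char = None
--     current_run_length = 0
--
--     for char in symbols:
--         if char == current_char:
--             current_run_length += 1
--         else:
--             current_char = char
--             current_run_length = 1
--
--         if current_run_length == length:
--             count += 1
--
--     return count
-- ===== SOURCE B (Python) =====
-- def runs(symbols: str, length: int) -> int:
--     """Count maximal runs of identical characters whose size reaches `length`."""
--     if length < 1:
--         return 0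
--     count = 0
--     i = 0
--     n = len(symbols)
--     while i < n:
--         j = i
--         while j < n and symbols[j] == symbols[i]:
--             j += 1
--         if j - i >= length:
--             count += 1
--         i = j
--     return count
-- ===== Notes on version B (the rewrite author's own statement) =====
-- stated objective: alternative
-- what changed: B segments the string into maximal runs with a two-pointer scan and counts runs of size >= length (guarding length < 1), instead of A's per-character state machine with a rolling run-length counter and exact-threshold check.
import Mathlib
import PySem

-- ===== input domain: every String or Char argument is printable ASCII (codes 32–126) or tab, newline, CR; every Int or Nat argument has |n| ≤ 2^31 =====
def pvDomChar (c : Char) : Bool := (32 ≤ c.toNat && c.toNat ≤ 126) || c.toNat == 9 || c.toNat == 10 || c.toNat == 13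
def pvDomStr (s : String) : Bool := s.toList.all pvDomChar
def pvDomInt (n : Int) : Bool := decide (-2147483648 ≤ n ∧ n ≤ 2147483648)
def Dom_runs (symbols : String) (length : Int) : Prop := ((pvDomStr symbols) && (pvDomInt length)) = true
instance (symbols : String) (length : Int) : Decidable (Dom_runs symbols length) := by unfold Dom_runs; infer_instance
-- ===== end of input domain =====

-- B segments the string into maximal runs and counts those of size >= length (alternative decomposition; same cost).


-- ===== PORT A =====
-- A: one pass; state (count, current_char, current_run_length); count += 1 exactly when the run counter hits `length`.
def stepA (length : Int) (s : Int × Option Char × Int) (char : Char) : Int × Option Char × Int :=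
  let (count, currentChar, runLen) := s
  let (currentChar, runLen) :=
    if some char == currentChar then (currentChar, runLen + 1)
    else (some char, (1 : Int))
  let count := if runLen == length then count + 1 else count
  (count, currentChar, runLen)

def runs (symbols : String) (length : Int) : Int :=
  (symbols.toList.foldl (stepA length) (0, none, 0)).1

-- ===== PORT B =====
-- B: split into maximal runs (inner while loop = takeWhile/dropWhile of the leading run) and count runs of size ≥ length.
def runsAltGo (length : Int) : List Char → Int
  | [] => 0
  | c :: rest =>
    (if length ≤ (rest.takeWhile (· == c)).length + 1 then 1 else 0)
      + runsAltGo length (rest.dropWhile (· == c))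
termination_by l => l.length
decreasing_by
  simpa using Nat.lt_succ_of_le (List.length_dropWhile_le _ _)

def runs_alt (symbols : String) (length : Int) : Int :=
  if length < 1 then 0 else runsAltGo length symbols.toList

-- ===== PRECONDITION & SPEC =====
def Spec_runs (symbols : String) (length : Int) (out : Int) : Prop := out = runs_alt symbols length
instance (symbols : String) (length : Int) (out : Int) : Decidable (Spec_runs symbols length out) := by unfold Spec_runs; infer_instance

-- ===== CLAIM (what is proved, stated in full; the proofs are below) =====
def Claim_equal_runs : Prop := ∀ (symbols : String) (length : Int), Dom_runs symbols length → Spec_runs symbols length (runs symbols length)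

-- ===== LEMMAS AND PROOFS =====

-- proof-side view of A's loop: the count it still adds from state (cur, r) onward
def goAux (L : Int) : Option Char → Int → List Char → Int
  | _, _, [] => 0
  | cur, r, c :: xs =>
    if some c == cur then (if r + 1 == L then 1 else 0) + goAux L cur (r + 1) xs
    else (if (1 : Int) == L then 1 else 0) + goAux L (some c) 1 xs

theorem foldl_eq_goAux (L : Int) (xs : List Char) :
    ∀ (cnt : Int) (cur : Option Char) (r : Int),
      (xs.foldl (stepA L) (cnt, cur, r)).1 = cnt + goAux L cur r xs := by
  induction xs with
  | nil => intro cnt cur r; simp [goAux]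
  | cons c xs ih =>
    intro cnt cur r
    rw [List.foldl_cons]
    by_cases h : some c == cur
    · have hs : stepA L (cnt, cur, r) c
          = ((if r + 1 == L then cnt + 1 else cnt), cur, r + 1) := by
        simp [stepA, h]
      rw [hs, ih]
      simp only [goAux, h, if_true]
      split_ifs <;> ring
    · have hs : stepA L (cnt, cur, r) c
          = ((if (1 : Int) == L then cnt + 1 else cnt), some c, 1) := by
        simp [stepA, h]
      rw [hs, ih]
      simp only [goAux, h, Bool.false_eq_true, if_false]
      split_ifs <;> ring

theorem goAux_nonpos (L : Int) (hL : L < 1) (xs : List Char) :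
    ∀ (cur : Option Char) (r : Int), 0 ≤ r → goAux L cur r xs = 0 := by
  induction xs with
  | nil => intro cur r _; simp [goAux]
  | cons c xs ih =>
    intro cur r hr
    by_cases h : some c == cur
    · have h1 : (r + 1 == L) = false := by simp; omega
      simp [goAux, h, h1, ih cur (r + 1) (by omega)]
    · have h1 : ((1 : Int) == L) = false := by simp; omega
      simp [goAux, h, h1, ih (some c) 1 (by omega)]

-- A's count over a continuing run: one hit iff the threshold lies within the extension of the current run
theorem goAux_run (L : Int) (c : Char) (xs : List Char) :
    ∀ (r : Int), 1 ≤ r →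
    goAux L (some c) r xs =
      (if r < L ∧ L ≤ r + ((xs.takeWhile (· == c)).length : Int) then 1 else 0)
        + goAux L none 0 (xs.dropWhile (· == c)) := by
  induction xs with
  | nil =>
    intro r _
    simp only [List.takeWhile_nil, List.dropWhile_nil, List.length_nil, Nat.cast_zero, add_zero,
      goAux]
    have : ¬ (r < L ∧ L ≤ r) := by omega
    simp [this]
  | cons x xs ih =>
    intro r hr
    by_cases h : x = c
    · subst h
      have htw : (x :: xs).takeWhile (· == x) = x :: xs.takeWhile (· == x) := by
        simp [List.takeWhile]
      have hdw : (x :: xs).dropWhile (· == x) = xs.dropWhile (· == x) := by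
        simp [List.dropWhile]
      have hun : goAux L (some x) r (x :: xs)
          = (if r + 1 == L then 1 else 0) + goAux L (some x) (r + 1) xs := by
        simp [goAux]
      rw [hun, ih (r + 1) (by omega), htw, hdw]
      generalize goAux L none 0 (xs.dropWhile (· == x)) = X
      simp only [List.length_cons, beq_iff_eq]
      push_cast
      split_ifs <;> omega
    · have hb : (x == c) = false := by simp [h]
      have htw : (x :: xs).takeWhile (· == c) = [] := by simp [List.takeWhile, hb]
      have hdw : (x :: xs).dropWhile (· == c) = x :: xs := by simp [List.dropWhile, hb]
      rw [htw, hdw]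
      have hfalse : ¬ (r < L ∧ L ≤ r + (([] : List Char).length : Int)) := by
        simp only [List.length_nil, Nat.cast_zero, add_zero]; omega
      rw [if_neg hfalse]
      have h1 : (some x == some c) = false := by simp [h]
      have h2 : (some x == (none : Option Char)) = false := by simp
      simp [goAux, h1, h2]

theorem goAux_eq_runsAltGo (L : Int) (hL : 1 ≤ L) :
    ∀ (n : ℕ) (xs : List Char), xs.length ≤ n → goAux L none 0 xs = runsAltGo L xs := by
  intro n
  induction n with
  | zero =>
    intro xs h
    have : xs = [] := List.eq_nil_of_length_eq_zero (Nat.le_zero.mp h)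
    subst this; simp [goAux, runsAltGo]
  | succ n ih =>
    intro xs h
    cases xs with
    | nil => simp [goAux, runsAltGo]
    | cons c rest =>
      have h2 : (some c == (none : Option Char)) = false := by simp
      have hun : goAux L none 0 (c :: rest)
          = (if (1 : Int) == L then 1 else 0) + goAux L (some c) 1 rest := by
        simp [goAux, h2]
      rw [hun, goAux_run L c rest 1 (le_refl 1),
          ih (rest.dropWhile (· == c)) (le_trans (List.length_dropWhile_le _ _) (by simpa using h)),
          runsAltGo]
      generalize runsAltGo L (rest.dropWhile (· == c)) = X
      simp only [beq_iff_eq]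
      split_ifs <;> omega

-- ===== VERDICT (by name: the statement is the Claim_ definition above) =====
theorem runs_spec : Claim_equal_runs := by
  intro symbols L _
  unfold Spec_runs runs runs_alt
  rw [foldl_eq_goAux]
  by_cases hL : L < 1
  · simp [hL, goAux_nonpos L hL symbols.toList none 0 le_rfl]
  · rw [if_neg hL,
        goAux_eq_runsAltGo L (by omega) symbols.toList.length symbols.toList le_rfl]
    ring
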